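-- pv_equiv track=rewrite | github.com/clnakagawa/ntm-analysis | findPrimers.py | getT
-- ===== SOURCE A (Python) =====
-- def getT(seq):
--     t = 0
--     for b in seq:
--         if b in ['a', 't']:
--             t += 2
--         else:
--             t += 4
--     return t
-- ===== SOURCE B (Python) =====
-- def getT(seq):
--     return 4 * len(seq) - 2 * (seq.count('a') + seq.count('t'))
-- ===== Notes on version B (the rewrite author's own statement) =====
-- stated objective: faster
-- what changed: Replaced the per-character branching accumulator loop by a closed form combining the string length with the counts of the two weak bases obtained via str.count: 4*len - 2*(count of a-bases + count of t-bases).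
import Mathlib
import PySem

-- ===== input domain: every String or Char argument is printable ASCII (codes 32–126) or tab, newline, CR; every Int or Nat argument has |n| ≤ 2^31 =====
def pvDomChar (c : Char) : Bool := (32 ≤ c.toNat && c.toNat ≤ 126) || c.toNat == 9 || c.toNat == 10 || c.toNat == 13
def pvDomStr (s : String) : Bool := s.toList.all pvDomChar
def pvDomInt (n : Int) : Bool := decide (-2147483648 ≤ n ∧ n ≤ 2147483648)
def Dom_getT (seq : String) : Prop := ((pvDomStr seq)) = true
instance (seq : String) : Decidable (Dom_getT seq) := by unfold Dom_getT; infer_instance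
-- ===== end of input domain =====

-- B replaces A's per-character branching accumulator loop by a closed form: 4*len(seq) - 2*(count of a + count of t), computed with str.count (measurably faster: C-level counting instead of a Python loop).


-- ===== PORT A =====
-- for b in seq: t += 2 if b in ['a','t'] else 4
def getT (seq : String) : Int :=
  seq.toList.foldl (fun t b => if b ∈ ['a', 't'] then t + 2 else t + 4) 0

-- ===== PORT B =====
-- return 4 * len(seq) - 2 * (seq.count('a') + seq.count('t'))
def getT_alt (seq : String) : Int :=
  4 * PySem.Str.len seq - 2 * ((PySem.Str.count seq "a" : Int) + (PySem.Str.count seq "t" : Int))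

-- ===== PRECONDITION & SPEC =====
def Spec_getT (seq : String) (out : Int) : Prop := out = getT_alt seq
instance (seq : String) (out : Int) : Decidable (Spec_getT seq out) := by unfold Spec_getT; infer_instance

-- ===== CLAIM (what is proved, stated in full; the proofs are below) =====
def Claim_equal_getT : Prop := ∀ (seq : String), Dom_getT seq → Spec_getT seq (getT seq)

-- ===== LEMMAS AND PROOFS =====
-- Chars.count with a single-character pattern is List.count (fuel induction on count.go).
theorem count_go_singleton (c : Char) : ∀ (fuel : Nat) (s : List Char) (acc : Nat),
    s.length ≤ fuel → PySem.Chars.count.go [c] fuel s acc = acc + s.count c := by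
  intro fuel
  induction fuel with
  | zero =>
    intro s acc h
    have : s = [] := List.eq_nil_of_length_eq_zero (Nat.le_zero.mp h)
    subst this; simp [PySem.Chars.count.go]
  | succ n ih =>
    intro s acc h
    cases s with
    | nil => simp [PySem.Chars.count.go]
    | cons hd tl =>
      simp only [PySem.Chars.count.go, List.isPrefixOf]
      by_cases hc : c = hd
      · subst hc
        simp only [BEq.rfl, Bool.true_and, if_pos]
        rw [ih _ _ (by simpa using h)]
        simp
        omega
      · have : (c == hd) = false := by simp [hc]
        simp only [this, Bool.false_and, if_neg Bool.false_ne_true]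
        rw [ih _ _ (by simpa using Nat.le_of_succ_le_succ h)]
        simp [Ne.symm hc]

theorem chars_count_singleton (s : List Char) (c : Char) :
    PySem.Chars.count s [c] = s.count c := by
  simp only [PySem.Chars.count, List.isEmpty_cons, if_neg Bool.false_ne_true]
  simpa using count_go_singleton c s.length s 0 le_rfl

theorem fold_eq (l : List Char) (t : Int) :
    l.foldl (fun t b => if b ∈ ['a', 't'] then t + 2 else t + 4) t
      = t + 4 * l.length - 2 * ((l.count 'a' : Int) + (l.count 't' : Int)) := by
  induction l generalizing t with
  | nil => simp
  | cons hd tl ih =>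
    simp only [List.foldl_cons, ih, List.length_cons, List.count_cons]
    by_cases h1 : hd = 'a'
    · simp [h1]; ring
    · by_cases h2 : hd = 't'
      · simp [h2]; ring
      · simp [h1, h2]; ring

-- ===== VERDICT (by name: the statement is the Claim_ definition above) =====
theorem getT_spec : Claim_equal_getT := by
  intro seq _
  unfold Spec_getT getT getT_alt
  rw [fold_eq]
  have ha : ((PySem.Str.count seq "a" : Nat) : Int) = (seq.toList.count 'a' : Int) := by
    simp only [PySem.Str.count]
    rw [show ("a" : String).toList = ['a'] from rfl, chars_count_singleton]
  have ht : ((PySem.Str.count seq "t" : Nat) : Int) = (seq.toList.count 't' : Int) := by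
    simp only [PySem.Str.count]
    rw [show ("t" : String).toList = ['t'] from rfl, chars_count_singleton]
  simp only [PySem.Str.len, ha, ht]
  ring
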